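-- pv_equiv track=rewrite | github.com/gthcon/streaming-log-compression | test_logs/codec_v6.py | decode_int_dict_column
-- ===== SOURCE A (Python) =====
-- def decode_varint(data, pos):
--     result = 0
--     shift = 0
--     while True:
--         b = data[pos]
--         result |= (b & 0x7F) << shift
--         pos += 1
--         if not (b & 0x80):
--             break
--         shift += 7
--     return result, pos
--
-- def decode_signed_varint(data, pos):
--     zigzag, pos = decode_varint(data, pos)
--     return (zigzag >> 1) ^ (-(zigzag & 1)), pos
--
-- def unpack_bits(data, count, bits_per_value):
--     if not data or bits_per_value == 0 or count == 0:
--         return [0] * count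
--     result = []
--     bit_pos = 0
--     for _ in range(count):
--         val = 0
--         remaining = bits_per_value
--         while remaining > 0:
--             byte_idx = bit_pos // 8
--             bit_offset = bit_pos % 8
--             available = 8 - bit_offset
--             take = min(available, remaining)
--             byte_val = data[byte_idx] if byte_idx < len(data) else 0
--             shift = available - take
--             bits = (byte_val >> shift) & ((1 << take) - 1)
--             val = (val << take) | bits
--             bit_pos += take
--             remaining -= take
--         result.append(val)
--     return result
--
-- def decode_int_dict_column(data, pos, n_rows):
--     """Decode integer dictionary column"""
--     vocab_size, pos = decode_varint(data, pos)
--     vocab = []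
--     for _ in range(vocab_size):
--         val, pos = decode_signed_varint(data, pos)
--         vocab.append(val)
--
--     bits = data[pos]
--     pos += 1
--     packed_len, pos = decode_varint(data, pos)
--     packed = data[pos:pos+packed_len]
--     pos += packed_len
--
--     indices = unpack_bits(packed, n_rows, bits)
--     return [vocab[i] if i < len(vocab) else 0 for i in indices], pos
-- ===== SOURCE B (Python) =====
-- def decode_int_dict_column(data, pos, n_rows):
--     """Decode integer dictionary column (flatten-the-bitstream variant)."""
--     def varint(p):
--         r = 0
--         s = 0
--         while True:
--             b = data[p]
--             p += 1
--             r |= (b & 0x7F) << s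
--             if not (b & 0x80):
--                 return r, p
--             s += 7
--
--     vocab_size, pos = varint(pos)
--     vocab = []
--     for _ in range(vocab_size):
--         z, pos = varint(pos)
--         vocab.append((z >> 1) ^ -(z & 1))
--     bits = data[pos]
--     pos += 1
--     packed_len, pos = varint(pos)
--     packed = data[pos:pos + packed_len]
--     pos += packed_len
--     if not packed or bits <= 0 or n_rows == 0:
--         fill = vocab[0] if vocab else 0
--         return [fill] * n_rows, pos
--     stream = [(b >> k) & 1 for b in packed for k in range(7, -1, -1)]
--     out = []
--     for i in range(n_rows):
--         chunk = stream[i * bits:(i + 1) * bits]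
--         chunk += [0] * (bits - len(chunk))
--         v = 0
--         for bit in chunk:
--             v = v * 2 + bit
--         out.append(vocab[v] if v < len(vocab) else 0)
--     return out, pos
-- ===== Notes on version B (the rewrite author's own statement) =====
-- stated objective: alternative
-- what changed: The per-value bit-unpacking loop (byte index / bit offset / partial-byte masking per value) is replaced by flattening the packed buffer once into a flat bit list and folding each fixed-width chunk of it (zero-padded past the end), with nonpositive bit widths folded into the degenerate fill path; the ports are proved equal on every input, and Pre_ holds exactly on the inputs where Python A returns normally, excluding only those where A raises IndexError on a header read.
import Mathlib
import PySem

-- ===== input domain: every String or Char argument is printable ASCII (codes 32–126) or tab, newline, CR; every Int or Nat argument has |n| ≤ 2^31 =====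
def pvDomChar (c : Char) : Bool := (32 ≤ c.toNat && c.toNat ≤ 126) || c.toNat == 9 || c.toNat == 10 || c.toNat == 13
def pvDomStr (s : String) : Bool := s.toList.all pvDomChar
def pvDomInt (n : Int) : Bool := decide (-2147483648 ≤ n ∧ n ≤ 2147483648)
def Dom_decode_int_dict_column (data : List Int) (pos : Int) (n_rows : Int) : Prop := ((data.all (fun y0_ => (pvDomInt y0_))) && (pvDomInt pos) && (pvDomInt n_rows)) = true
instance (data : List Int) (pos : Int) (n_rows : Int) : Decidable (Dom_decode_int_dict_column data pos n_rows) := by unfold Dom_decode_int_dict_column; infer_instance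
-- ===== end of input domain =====

-- B replaces A's per-value byte-walking unpack loop by flattening the packed buffer into one bit list and
-- chunking it (same results, same cost class; objective: alternative decomposition, not faster).
-- Out-of-range reads data[pos] (where Python raises IndexError) are modeled as a 0 default in both ports;
-- the ports are proved equal on ALL inputs, and Pre_ holds exactly where the Python A returns normally.

-- ===== PORT A =====
-- decode_varint: the while-True loop, fuel-bounded; fuel 2*len+2 is never exhausted on inputs where
-- Python returns (each step moves pos up by 1 and an out-of-range read stops via the 0 default).
def varintLoopA (data : List Int) (result shift pos : Int) : Nat → Int × Int
  | 0 => (result, pos)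
  | f + 1 =>
    let b := PySem.List.pyGetD data pos 0
    let result' := PySem.Int.bor result (PySem.Int.band b 127 <<< shift.toNat)
    if PySem.Int.band b 128 = 0 then (result', pos + 1)
    else varintLoopA data result' (shift + 7) (pos + 1) f

def decode_varintA (data : List Int) (pos : Int) : Int × Int :=
  varintLoopA data 0 0 pos (data.length * 2 + 2)

def decode_signed_varintA (data : List Int) (pos : Int) : Int × Int :=
  let zp := decode_varintA data pos
  (PySem.Int.bxor (zp.1 >>> (1 : Nat)) (-(PySem.Int.band zp.1 1)), zp.2)

-- the inner 'while remaining > 0' loop of unpack_bits; fuel remaining.toNat suffices (take ≥ 1 per step)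
def unpackInnerA (data : List Int) (val bit_pos remaining : Int) : Nat → Int × Int
  | 0 => (val, bit_pos)
  | f + 1 =>
    if remaining ≤ 0 then (val, bit_pos)
    else
      let byte_idx := PySem.Int.floordiv bit_pos 8
      let bit_offset := PySem.Int.mod bit_pos 8
      let available := 8 - bit_offset
      let take := min available remaining
      let byte_val := if byte_idx < (data.length : Int) then PySem.List.pyGetD data byte_idx 0 else 0
      let shift := available - take
      let bits := PySem.Int.band (byte_val >>> shift.toNat) (((1 : Int) <<< take.toNat) - 1)
      let val' := PySem.Int.bor (val <<< take.toNat) bits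
      unpackInnerA data val' (bit_pos + take) (remaining - take) f

def unpack_bitsA (data : List Int) (count bits_per_value : Int) : List Int :=
  if data = [] ∨ bits_per_value = 0 ∨ count = 0 then List.replicate count.toNat 0
  else
    ((List.range count.toNat).foldl (fun (st : List Int × Int) _ =>
        let vb := unpackInnerA data 0 st.2 bits_per_value bits_per_value.toNat
        (st.1 ++ [vb.1], vb.2)) ([], 0)).1

def decode_int_dict_column (data : List Int) (pos : Int) (n_rows : Int) : List Int × Int :=
  let vp := decode_varintA data pos
  let vocab_size := vp.1
  let st := (List.range vocab_size.toNat).foldl (fun (st : List Int × Int) _ =>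
      let v := decode_signed_varintA data st.2
      (st.1 ++ [v.1], v.2)) ([], vp.2)
  let vocab := st.1
  let bits := PySem.List.pyGetD data st.2 0
  let pp := decode_varintA data (st.2 + 1)
  let packed_len := pp.1
  let packed := PySem.List.slice data (some pp.2) (some (pp.2 + packed_len))
  let pos5 := pp.2 + packed_len
  let indices := unpack_bitsA packed n_rows bits
  (indices.map (fun i => if i < (vocab.length : Int) then PySem.List.pyGetD vocab i 0 else 0), pos5)

-- ===== PORT B =====
def varintLoopB (data : List Int) (result shift pos : Int) : Nat → Int × Int
  | 0 => (result, pos)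
  | f + 1 =>
    let b := PySem.List.pyGetD data pos 0
    let result' := PySem.Int.bor result (PySem.Int.band b 127 <<< shift.toNat)
    if PySem.Int.band b 128 = 0 then (result', pos + 1)
    else varintLoopB data result' (shift + 7) (pos + 1) f

def varintB (data : List Int) (pos : Int) : Int × Int :=
  varintLoopB data 0 0 pos (data.length * 2 + 2)

def decode_int_dict_column_alt (data : List Int) (pos : Int) (n_rows : Int) : List Int × Int :=
  let vp := varintB data pos
  let vocab_size := vp.1
  let st := (List.range vocab_size.toNat).foldl (fun (st : List Int × Int) _ =>
      let z := varintB data st.2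
      (st.1 ++ [PySem.Int.bxor (z.1 >>> (1 : Nat)) (-(PySem.Int.band z.1 1))], z.2)) ([], vp.2)
  let vocab := st.1
  let bits := PySem.List.pyGetD data st.2 0
  let pp := varintB data (st.2 + 1)
  let packed := PySem.List.slice data (some pp.2) (some (pp.2 + pp.1))
  let pos5 := pp.2 + pp.1
  if packed = [] ∨ bits ≤ 0 ∨ n_rows = 0 then
    let fill := if vocab = [] then 0 else PySem.List.pyGetD vocab 0 0
    (List.replicate n_rows.toNat fill, pos5)
  else
    let stream := packed.flatMap (fun b =>
      (PySem.List.pyRange 7 (-1) (-1)).map (fun k => PySem.Int.band (b >>> k.toNat) 1))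
    ((PySem.List.pyRange 0 n_rows 1).foldl (fun (out : List Int) i =>
        let chunk := PySem.List.slice stream (some (i * bits)) (some ((i + 1) * bits))
        let chunk := chunk ++ List.replicate (bits - (chunk.length : Int)).toNat 0
        let v := chunk.foldl (fun v bit => v * 2 + bit) 0
        out ++ [if v < (vocab.length : Int) then PySem.List.pyGetD vocab v 0 else 0]) [],
     pos5)

-- ===== PRECONDITION & SPEC =====
-- Helpers that characterise where Python A returns: a varint read started at an in-range cursor p
-- succeeds iff some position q with p ≤ q < len(data) carries a byte whose 0x80 bit is clear, and the
-- read then ends at q+1 for the FIRST such q (all reads on the way stay in bounds).  These helpers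
-- describe only which positions are read, never the decoded column.
def pvFirstClear (data : List Int) (p : Int) : Option Int :=
  (PySem.List.pyRange p (data.length : Int) 1).find?
    (fun q => PySem.Int.band (PySem.List.pyGetD data q 0) 128 == 0)

-- end position after a chain of n successive varint reads (none = some read raises IndexError);
-- n larger than 2*len(data) always fails, so the fuel min below loses nothing.
def pvChainEnd (data : List Int) : Int → Nat → Option Int
  | p, 0 => some p
  | p, n + 1 =>
    if -(data.length : Int) ≤ p then
      match pvFirstClear data p with
      | none => none
      | some q => pvChainEnd data (q + 1) n
    else none

-- the integer value of the varint occupying positions p..q (needed only as the vocab-loop count)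
def pvVarintVal (data : List Int) (p q : Int) : Int :=
  (List.range (q - p + 1).toNat).foldr
    (fun (j : Nat) acc => PySem.Int.band (PySem.List.pyGetD data (p + (j : Int)) 0) 127 * (2 : Int) ^ (7 * j) + acc) 0

def pvPreB (data : List Int) (pos : Int) : Bool :=
  let L : Int := data.length
  if -L ≤ pos then
    match pvFirstClear data pos with
    | none => false
    | some q0 =>
      let vs := pvVarintVal data pos q0
      match pvChainEnd data (q0 + 1) (min vs.toNat (2 * data.length)) with
      | none => false
      | some P =>
        decide (-L ≤ P ∧ P < L) && (pvFirstClear data (P + 1)).isSome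
  else false

-- Pre_ holds exactly on the inputs where the Python A returns normally: every data[...] read of the
-- header walk (vocab-size varint, the vocab_size vocab varints, the bits byte, the packed-length
-- varint) stays in bounds; it excludes only inputs on which A raises IndexError.
def Pre_decode_int_dict_column (data : List Int) (pos : Int) (n_rows : Int) : Prop :=
  pvPreB data pos = true

instance (data : List Int) (pos : Int) (n_rows : Int) : Decidable (Pre_decode_int_dict_column data pos n_rows) := by
  unfold Pre_decode_int_dict_column; infer_instance

def pvWitness_decode_int_dict_column : List Int × Int × Int := ([1, 4, 1, 1, 170], 0, 3)

def Spec_decode_int_dict_column (data : List Int) (pos : Int) (n_rows : Int) (out : List Int × Int) : Prop := out = decode_int_dict_column_alt data pos n_rows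
instance (data : List Int) (pos : Int) (n_rows : Int) (out : List Int × Int) : Decidable (Spec_decode_int_dict_column data pos n_rows out) := by unfold Spec_decode_int_dict_column; infer_instance

-- ===== CLAIM (what is proved, stated in full; the proofs are below) =====
def Claim_equal_decode_int_dict_column : Prop := ∀ (data : List Int) (pos : Int) (n_rows : Int), Dom_decode_int_dict_column data pos n_rows → Pre_decode_int_dict_column data pos n_rows → Spec_decode_int_dict_column data pos n_rows (decode_int_dict_column data pos n_rows)

-- ===== LEMMAS AND PROOFS =====

theorem varintLoopB_eq (data : List Int) (result shift pos : Int) (f : Nat) :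
    varintLoopB data result shift pos f = varintLoopA data result shift pos f := by
  induction f generalizing result shift pos with
  | zero => rfl
  | succ f ih =>
    simp only [varintLoopA, varintLoopB]
    split <;> simp [ih]

theorem varintB_eq : varintB = decode_varintA := by
  funext data pos
  simp [varintB, decode_varintA, varintLoopB_eq]

-- bit j (MSB-first) of the zero-extended packed byte stream
def sbit (packed : List Int) (j : Nat) : Int :=
  PySem.Int.band (packed.getD (j / 8) 0 >>> (7 - j % 8)) 1

theorem emod_two_mul (y : Int) (m : Int) (hm : 0 < m) :
    y % (2 * m) = (y / 2 % m) * 2 + y % 2 := by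
  have a := Int.mul_ediv_add_emod y 2
  have b := Int.mul_ediv_add_emod (y / 2) m
  have h1 : y = ((y / 2 % m) * 2 + y % 2) + (2 * m) * (y / 2 / m) := by linear_combination -a - 2 * b
  have hr2 : 0 ≤ y % 2 ∧ y % 2 < 2 := ⟨Int.emod_nonneg y (by omega), Int.emod_lt_of_pos y (by omega)⟩
  have hqr : 0 ≤ y / 2 % m ∧ y / 2 % m < m :=
    ⟨Int.emod_nonneg _ (by omega), Int.emod_lt_of_pos _ hm⟩
  calc y % (2 * m) = (((y / 2 % m) * 2 + y % 2) + (2 * m) * (y / 2 / m)) % (2 * m) := by rw [← h1]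
    _ = ((y / 2 % m) * 2 + y % 2) % (2 * m) := Int.add_mul_emod_self_left ..
    _ = (y / 2 % m) * 2 + y % 2 := Int.emod_eq_of_lt (by omega) (by omega)

theorem band_mask (x : Int) (t : Nat) : PySem.Int.band x (2 ^ t - 1) = x % (2 ^ t : Int) := by
  have hm : (0:Int) < 2 ^ t := by positivity
  by_cases hx : 0 ≤ x
  · rw [PySem.Int.band_of_nonneg hx (by omega)]
    have h1 : ((2:Int) ^ t - 1).toNat = 2 ^ t - 1 := by
      have : ((2:Int) ^ t) = ((2 ^ t : Nat) : Int) := by push_cast; ring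
      omega
    rw [h1, Nat.and_two_pow_sub_one_eq_mod]
    have h2 : x = (x.toNat : Int) := by omega
    conv_rhs => rw [h2]
    have h3 : ((2:Int) ^ t) = ((2 ^ t : Nat) : Int) := by push_cast; ring
    rw [h3]
    push_cast
    rfl
  · -- negative x: unfold the two's-complement definition of band
    have hx' : ¬ 0 ≤ x := hx
    simp only [PySem.Int.band, if_neg hx', if_pos (show (0:Int) ≤ 2 ^ t - 1 by omega)]
    have h1 : ((2:Int) ^ t - 1).toNat = 2 ^ t - 1 := by
      have : ((2:Int) ^ t) = ((2 ^ t : Nat) : Int) := by push_cast; ring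
      omega
    rw [h1, Nat.land_comm, Nat.and_two_pow_sub_one_eq_mod]
    set y := (-x - 1).toNat with hy
    have hxy : x = -1 - (y : Int) := by omega
    have hyr : y % 2 ^ t < 2 ^ t := Nat.mod_lt _ (by positivity)
    have hymod : (y : Int) % (2 ^ t : Int) = ((y % 2 ^ t : Nat) : Int) := by
      push_cast; omega
    have hdecomp : x = ((2 ^ t : Int) - 1 - ((y % 2 ^ t : Nat) : Int)) + (2 ^ t : Int) * (-(((y / 2 ^ t : Nat) : Int)) - 1) := by
      have hq : (2 ^ t : Nat) * (y / 2 ^ t) + y % 2 ^ t = y := Nat.div_add_mod y (2 ^ t)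
      have hq' : ((2 ^ t : Nat) : Int) * ((y / 2 ^ t : Nat) : Int) + ((y % 2 ^ t : Nat) : Int) = (y : Int) := by
        exact_mod_cast congrArg (fun n : Nat => (n : Int)) hq
      push_cast at hq' ⊢
      nlinarith [hq']
    rw [hdecomp, Int.add_mul_emod_self_left ..]
    rw [Int.emod_eq_of_lt (by omega) (by omega)]
    have hle : y % 2 ^ t ≤ 2 ^ t - 1 := by omega
    push_cast
    omega

theorem bor_shift_add (v b : Int) (t : Nat) (hv : 0 ≤ v) (hb0 : 0 ≤ b) (hb : b < 2 ^ t) :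
    PySem.Int.bor (v <<< t) b = v * 2 ^ t + b := by
  rcases Int.eq_ofNat_of_zero_le hv with ⟨n, rfl⟩
  rcases Int.eq_ofNat_of_zero_le hb0 with ⟨m, rfl⟩
  have hm : m < 2 ^ t := by exact_mod_cast hb
  rw [Int.shiftLeft_eq]
  have hcast : ((n : Int) * 2 ^ t) = ((n * 2 ^ t : Nat) : Int) := by push_cast; ring
  rw [hcast, PySem.Int.bor_natCast]
  rw [Nat.mul_comm n (2 ^ t), ← Nat.two_pow_add_eq_or_of_lt hm]
  push_cast
  ring

theorem byte_fold (b : Int) (o t : Nat) (ht : o + t ≤ 8) :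
    (List.range t).foldl (fun a j => a * 2 + PySem.Int.band (b >>> (7 - (o + j))) 1) 0 =
      PySem.Int.band (b >>> (8 - o - t)) (2 ^ t - 1) := by
  induction t with
  | zero => simp
  | succ t ih =>
    rw [List.range_succ, List.foldl_append, ih (by omega)]
    simp only [List.foldl_cons, List.foldl_nil]
    have hs : 8 - o - t = (8 - o - (t + 1)) + 1 := by omega
    have h7 : 7 - (o + t) = 8 - o - (t + 1) := by omega
    rw [hs, h7]
    set s := 8 - o - (t + 1) with hsdef
    rw [band_mask, band_mask, PySem.Int.band_one, PySem.Int.mod_eq_emod_of_pos (by omega)]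
    have hsr : b >>> (s + 1) = (b >>> s) / 2 := by
      rw [Int.shiftRight_add b s 1, Int.shiftRight_eq_div_pow]; norm_num
    have hpow : (2 : Int) ^ (t + 1) = 2 * 2 ^ t := by ring
    rw [hsr, hpow, emod_two_mul _ _ (by positivity)]

theorem fold_lin (f : Nat → Int) (t : Nat) (v : Int) :
    (List.range t).foldl (fun a j => a * 2 + f j) v =
      v * 2 ^ t + (List.range t).foldl (fun a j => a * 2 + f j) 0 := by
  induction t generalizing v with
  | zero => simp
  | succ t ih =>
    rw [List.range_succ, List.foldl_append, List.foldl_append, ih]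
    simp only [List.foldl_cons, List.foldl_nil]
    ring

def rowVal (packed : List Int) (w s : Nat) : Int :=
  (List.range w).foldl (fun a j => a * 2 + sbit packed (s + j)) 0

theorem rowVal_split (packed : List Int) (t r bp : Nat) :
    (List.range (t + r)).foldl (fun a j => a * 2 + sbit packed (bp + j)) 0 =
      ((List.range t).foldl (fun a j => a * 2 + sbit packed (bp + j)) 0) * 2 ^ r +
        rowVal packed r (bp + t) := by
  rw [List.range_add, List.foldl_append, List.foldl_map]
  rw [fold_lin (fun j => sbit packed (bp + (t + j)))]
  unfold rowVal
  congr 1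
  apply PySem.List.foldl_congr_mem
  intro a j _
  have h : bp + (t + j) = bp + t + j := by omega
  rw [h]

theorem inner_eq_gen (packed : List Int) (w : Nat) :
    ∀ (v : Int) (bp f : Nat), w ≤ f → 0 ≤ v →
      unpackInnerA packed v (bp : Int) (w : Int) f =
        (v * 2 ^ w + rowVal packed w bp, ((bp + w : Nat) : Int)) := by
  induction w using Nat.strong_induction_on with
  | _ w ih =>
  intro v bp f hf hv
  match w, f with
  | 0, 0 =>
    simp [unpackInnerA, rowVal]
  | 0, f + 1 =>
    simp [unpackInnerA, rowVal]
  | w + 1, f + 1 =>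
    rw [unpackInnerA]
    rw [if_neg (by push_cast; omega)]
    dsimp only
    have hbi : PySem.Int.floordiv ((bp : Nat) : Int) 8 = ((bp / 8 : Nat) : Int) := by
      rw [PySem.Int.floordiv_eq_ediv_of_pos (by omega)]; omega
    have hmo : PySem.Int.mod ((bp : Nat) : Int) 8 = ((bp % 8 : Nat) : Int) := by
      rw [PySem.Int.mod_eq_emod_of_pos (by omega)]; omega
    set o : Nat := bp % 8 with ho
    have ho8 : o < 8 := Nat.mod_lt _ (by omega)
    set t : Nat := min (8 - o) (w + 1) with htdef
    have ht1 : 1 ≤ t := by omega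
    have htw : t ≤ w + 1 := by omega
    have hto : o + t ≤ 8 := by omega
    have hmin : min (8 - ((o : Nat) : Int)) (((w + 1 : Nat) : Int)) = ((t : Nat) : Int) := by
      push_cast; omega
    rw [hbi, hmo, hmin]
    have hbyte : (if ((bp / 8 : Nat) : Int) < (packed.length : Int)
        then PySem.List.pyGetD packed ((bp / 8 : Nat) : Int) 0 else 0) = packed.getD (bp / 8) 0 := by
      by_cases hlt : bp / 8 < packed.length
      · rw [if_pos (by exact_mod_cast hlt), PySem.List.pyGetD_natCast]
      · rw [if_neg (by exact_mod_cast hlt), List.getD_eq_default _ _ (by omega)]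
    rw [hbyte]
    set b : Int := packed.getD (bp / 8) 0 with hb
    have hsh : ((8 : Int) - ((o : Nat) : Int) - ((t : Nat) : Int)).toNat = 8 - o - t := by omega
    have htn : (((t : Nat) : Int)).toNat = t := by omega
    rw [hsh, htn]
    have hone : ((1 : Int) <<< t - 1) = 2 ^ t - 1 := by
      rw [Int.shiftLeft_eq, one_mul]
    rw [hone]
    have hBm := band_mask (b >>> (8 - o - t)) t
    set B : Int := PySem.Int.band (b >>> (8 - o - t)) (2 ^ t - 1) with hBdef
    have hBlo : 0 ≤ B := by
      rw [hBm]; exact Int.emod_nonneg _ (by positivity)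
    have hBhi : B < 2 ^ t := by
      rw [hBm]; exact Int.emod_lt_of_pos _ (by positivity)
    rw [bor_shift_add v B t hv hBlo hBhi]
    have harg1 : ((bp : Nat) : Int) + ((t : Nat) : Int) = (((bp + t : Nat)) : Int) := by push_cast; ring
    have harg2 : (((w + 1 : Nat)) : Int) - ((t : Nat) : Int) = (((w + 1 - t : Nat)) : Int) := by
      push_cast; omega
    rw [harg1, harg2]
    rw [ih (w + 1 - t) (by omega) (v * 2 ^ t + B) (bp + t) f (by omega) (by positivity)]
    rw [Prod.mk.injEq]
    have hsplit : rowVal packed (w + 1) bp =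
        B * 2 ^ (w + 1 - t) + rowVal packed (w + 1 - t) (bp + t) := by
      have hw : w + 1 = t + (w + 1 - t) := by omega
      have h := rowVal_split packed t (w + 1 - t) bp
      rw [← hw] at h
      unfold rowVal
      rw [h]
      congr 1
      congr 1
      rw [hBdef, ← byte_fold b o t hto]
      apply PySem.List.foldl_congr_mem
      intro a j hj
      have hjt : j < t := List.mem_range.mp hj
      have h1 : (bp + j) / 8 = bp / 8 := by omega
      have h2 : (bp + j) % 8 = o + j := by omega
      rw [sbit, h1, h2, ← hb]
    constructor
    · rw [hsplit]
      have hpw : (2 : Int) ^ (w + 1) = 2 ^ t * 2 ^ (w + 1 - t) := by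
        rw [← pow_add]; congr 1; omega
      rw [hpw]
      ring
    · congr 1
      omega

theorem inner_eq (packed : List Int) (w : Nat) (bp : Nat) (f : Nat) (hw : w ≤ f) :
    unpackInnerA packed 0 (bp : Int) (w : Int) f = (rowVal packed w bp, ((bp + w : Nat) : Int)) := by
  rw [inner_eq_gen packed w 0 bp f hw le_rfl]
  simp

theorem stream_getD (packed : List Int) (j : Nat) :
    (packed.flatMap (fun b =>
      (PySem.List.pyRange 7 (-1) (-1)).map (fun k => PySem.Int.band (b >>> k.toNat) 1))).getD j 0
      = sbit packed j := by
  have hpr : PySem.List.pyRange 7 (-1) (-1) = [(7 : Int), 6, 5, 4, 3, 2, 1, 0] := by decide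
  have hb01 : PySem.Int.band 0 1 = 0 := by decide
  induction packed generalizing j with
  | nil =>
    simp [sbit, hb01]
  | cons b ps ih =>
    rw [List.flatMap_cons]
    by_cases hj : j < 8
    · rw [List.getD_append _ _ _ j (by rw [hpr]; simp; omega)]
      rw [hpr]
      interval_cases j <;> simp [sbit]
    · rw [List.getD_append_right _ _ _ j (by rw [hpr]; simp; omega)]
      simp only [List.length_map, hpr, List.length_cons, List.length_nil]
      rw [show (0+1+1+1+1+1+1+1+1 : Nat) = 8 from rfl, ← hpr] at *
      rw [ih (j - 8)]
      unfold sbit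
      have h1 : j / 8 = (j - 8) / 8 + 1 := by omega
      have h2 : j % 8 = (j - 8) % 8 := by omega
      rw [h1, h2, List.getD_cons_succ]

theorem padded_map (stream : List Int) (s w : Nat) :
    (stream.drop s).take w ++ List.replicate (w - ((stream.drop s).take w).length) 0 =
      (List.range w).map (fun j => stream.getD (s + j) 0) := by
  have hcl : ((stream.drop s).take w).length = min w (stream.length - s) := by simp
  apply List.ext_getElem
  · simp only [List.length_append, List.length_replicate, List.length_map, List.length_range, hcl]
    omega
  · intro i h1 h2
    simp only [List.length_map, List.length_range] at h2
    simp only [List.getElem_map, List.getElem_range]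
    by_cases hi : i < ((stream.drop s).take w).length
    · rw [List.getElem_append_left hi]
      have hsl : s + i < stream.length := by rw [hcl] at hi; omega
      rw [List.getD_eq_getElem _ _ hsl]
      simp [List.getElem_take, List.getElem_drop]
    · rw [List.getElem_append_right (by omega)]
      rw [List.getElem_replicate]
      have hout : stream.length ≤ s + i := by rw [hcl] at hi; omega
      rw [List.getD_eq_default _ _ hout]

theorem repl_fold (m : Nat) (l : List Int) (p : Int) :
    (List.range m).foldl (fun (st : List Int × Int) _ => (st.1 ++ [(0 : Int)], st.2)) (l, p) =
      (l ++ List.replicate m 0, p) := by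
  induction m with
  | zero => simp
  | succ m ih =>
    rw [List.range_succ, List.foldl_append, ih]
    simp [List.replicate_succ']

theorem rows_fold (packed : List Int) (w : Nat) (hw : 0 < w) (m : Nat) :
    (List.range m).foldl (fun (st : List Int × Int) _ =>
        let vb := unpackInnerA packed 0 st.2 ((w : Nat) : Int) w
        (st.1 ++ [vb.1], vb.2)) ([], 0) =
      ((List.range m).map (fun k => rowVal packed w (k * w)), ((m * w : Nat) : Int)) := by
  induction m with
  | zero => simp
  | succ m ih =>
    rw [List.range_succ, List.foldl_append, ih]
    simp only [List.foldl_cons, List.foldl_nil]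
    rw [inner_eq packed w (m * w) w le_rfl]
    rw [List.map_append, Prod.mk.injEq]
    refine ⟨rfl, by push_cast; ring⟩

theorem unpack_map_eq (vocab packed : List Int) (bits n : Int) :
    (unpack_bitsA packed n bits).map
        (fun i => if i < (vocab.length : Int) then PySem.List.pyGetD vocab i 0 else 0) =
    (if packed = [] ∨ bits ≤ 0 ∨ n = 0 then
      List.replicate n.toNat (if vocab = [] then 0 else PySem.List.pyGetD vocab 0 0)
    else
      (PySem.List.pyRange 0 n 1).foldl (fun (out : List Int) i =>
        let stream := packed.flatMap (fun b =>
          (PySem.List.pyRange 7 (-1) (-1)).map (fun k => PySem.Int.band (b >>> k.toNat) 1))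
        let chunk := PySem.List.slice stream (some (i * bits)) (some ((i + 1) * bits))
        let chunk2 := chunk ++ List.replicate (bits - (chunk.length : Int)).toNat 0
        let v := chunk2.foldl (fun v bit => v * 2 + bit) 0
        out ++ [if v < (vocab.length : Int) then PySem.List.pyGetD vocab v 0 else 0]) []) := by
  have hfill : (if (0 : Int) < (vocab.length : Int) then PySem.List.pyGetD vocab 0 0 else 0) =
      (if vocab = [] then 0 else PySem.List.pyGetD vocab 0 0) := by
    cases vocab <;> simp
  by_cases hg : packed = [] ∨ bits ≤ 0 ∨ n = 0
  · rw [if_pos hg]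
    by_cases ha : packed = [] ∨ bits = 0 ∨ n = 0
    · unfold unpack_bitsA
      rw [if_pos ha, List.map_replicate, hfill]
    · have hbneg : bits < 0 := by
        push_neg at ha
        rcases hg with h | h | h
        · exact absurd h ha.1
        · omega
        · exact absurd h ha.2.2
      unfold unpack_bitsA
      rw [if_neg ha]
      have hfuel : bits.toNat = 0 := by omega
      rw [hfuel]
      rw [show (fun (st : List Int × Int) (_ : Nat) =>
            let vb := unpackInnerA packed 0 st.2 bits 0
            (st.1 ++ [vb.1], vb.2)) = (fun (st : List Int × Int) _ => (st.1 ++ [(0 : Int)], st.2))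
          from rfl]
      rw [repl_fold n.toNat [] 0]
      simp only [List.nil_append, List.map_replicate]
      rw [hfill]
  · rw [if_neg hg]
    push_neg at hg
    obtain ⟨hp, hb', hn⟩ := hg
    have hba : ¬(packed = [] ∨ bits = 0 ∨ n = 0) := by
      push_neg
      exact ⟨hp, by omega, hn⟩
    unfold unpack_bitsA
    rw [if_neg hba]
    have hwb : ((bits.toNat : Nat) : Int) = bits := Int.toNat_of_nonneg (le_of_lt hb')
    set w : Nat := bits.toNat with hwdef
    have hw : 0 < w := by omega
    rw [show bits = ((w : Nat) : Int) from hwb.symm]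
    rw [rows_fold packed w hw n.toNat]
    rcases le_or_gt n 0 with hn0 | hn0
    · have : n.toNat = 0 := by omega
      rw [this, PySem.List.pyRange_one_eq_nil hn0]
      simp
    · rw [PySem.List.pyRange_one 0 n]
      have hnn : ((n : Int) - 0).toNat = n.toNat := by omega
      rw [hnn]
      set stream := packed.flatMap (fun b =>
        (PySem.List.pyRange 7 (-1) (-1)).map (fun k => PySem.Int.band (b >>> k.toNat) 1)) with hstream
      have key : ∀ m : Nat,
          ((List.range m).map (fun k => rowVal packed w (k * w))).map
              (fun i => if i < (vocab.length : Int) then PySem.List.pyGetD vocab i 0 else 0) =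
            List.foldl (fun (out : List Int) i =>
              let chunk := PySem.List.slice stream (some (i * ((w : Nat) : Int)))
                (some ((i + 1) * ((w : Nat) : Int)))
              let chunk2 := chunk ++ List.replicate (((w : Nat) : Int) - (chunk.length : Int)).toNat 0
              let v := chunk2.foldl (fun v bit => v * 2 + bit) 0
              out ++ [if v < (vocab.length : Int) then PySem.List.pyGetD vocab v 0 else 0]) []
              ((List.range m).map (fun k : Nat => (0 : Int) + (k : Int))) := by
        intro m
        induction m with
        | zero => simp
        | succ m ih =>
          rw [List.range_succ, List.map_append, List.map_append, List.map_append, List.foldl_append,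
            ← ih]
          simp only [List.map_cons, List.map_nil, List.foldl_cons, List.foldl_nil]
          congr 1
          dsimp only
          have hc0 : (0 : Int) + (m : Int) = ((m : Nat) : Int) := by omega
          rw [hc0]
          have hm1 : ((m : Nat) : Int) * ((w : Nat) : Int) = (((m * w : Nat)) : Int) := by push_cast; ring
          have hm2 : (((m : Nat) : Int) + 1) * ((w : Nat) : Int) = ((((m + 1) * w : Nat)) : Int) := by
            push_cast; ring
          rw [hm1, hm2, PySem.List.slice_natCast]
          have hsub : (m + 1) * w - m * w = w := by
            rw [Nat.succ_mul]
            omega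
          rw [hsub]
          have hlen : ((stream.drop (m * w)).take w).length ≤ w := by simp
          have htn : (((w : Nat) : Int) - (((stream.drop (m * w)).take w).length : Int)).toNat =
              w - ((stream.drop (m * w)).take w).length := by omega
          rw [htn, padded_map stream (m * w) w, List.foldl_map]
          have hrow : (List.range w).foldl (fun v j => v * 2 + stream.getD (m * w + j) 0) 0 =
              rowVal packed w (m * w) := by
            unfold rowVal
            apply PySem.List.foldl_congr_mem
            intro a j _
            rw [hstream, stream_getD]
          rw [hrow]
      exact key n.toNat

theorem ab_eq (data : List Int) (pos n : Int) :
    decode_int_dict_column data pos n = decode_int_dict_column_alt data pos n := by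
  unfold decode_int_dict_column decode_int_dict_column_alt
  rw [varintB_eq]
  simp only [decode_signed_varintA]
  rw [unpack_map_eq]
  split_ifs <;> rfl

-- ===== VERDICT (by name: the statement is the Claim_ definition above) =====
theorem decode_int_dict_column_spec : Claim_equal_decode_int_dict_column := by
  intro data pos n_rows _ _
  show decode_int_dict_column data pos n_rows = decode_int_dict_column_alt data pos n_rows
  exact ab_eq data pos n_rows
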